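-- pv_equiv track=rewrite | github.com/adriadam10/advent_of_code | 2025/2/day2.py | bad_ids_twice
-- ===== SOURCE A (Python) =====
-- def bad_ids_twice(rango: range) -> list[int]:
--     bad: list[int] = list()
--     for n in rango:
--         n_str: str = str(n)
--         l = len(n_str)
--         if l%2 != 0: # Only happens if len is even
--             continue
--         j: int = l//2
--         if n_str[:j] * 2 == n_str:
--             bad.append(n)
--     return bad
-- ===== SOURCE B (Python) =====
-- def bad_ids_twice(rango) -> list[int]:
--     # Pure-arithmetic check: n reads as a doubled half-string iff n > 0, its
--     # digit count d is even, and the high half equals the low half numerically.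
--     bad: list[int] = []
--     for n in rango:
--         if n <= 0:
--             continue
--         d = 0
--         m = n
--         while m:
--             m //= 10
--             d += 1
--         if d % 2:
--             continue
--         half = 10 ** (d // 2)
--         if n // half == n % half:
--             bad.append(n)
--     return bad
-- ===== Notes on version B (the rewrite author's own statement) =====
-- stated objective: alternative
-- what changed: Replaces the per-element string construction, slicing and string comparison with pure integer arithmetic: count digits by repeated division and compare the high half n//10^(d/2) with the low half n%10^(d/2).
import Mathlib
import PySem

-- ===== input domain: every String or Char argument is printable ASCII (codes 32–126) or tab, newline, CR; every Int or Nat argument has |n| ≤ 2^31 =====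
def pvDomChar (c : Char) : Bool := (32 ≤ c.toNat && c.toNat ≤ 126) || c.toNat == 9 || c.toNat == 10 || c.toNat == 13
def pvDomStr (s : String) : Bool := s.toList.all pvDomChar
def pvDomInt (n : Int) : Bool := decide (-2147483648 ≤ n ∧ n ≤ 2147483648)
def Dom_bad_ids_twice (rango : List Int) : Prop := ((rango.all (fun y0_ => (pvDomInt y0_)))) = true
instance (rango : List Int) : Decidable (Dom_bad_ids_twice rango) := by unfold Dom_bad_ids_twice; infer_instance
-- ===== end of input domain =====

-- B replaces A's per-element string build/slice/compare by pure integer arithmetic (digit count by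
-- repeated division, then high half n//10^(d/2) vs low half n%10^(d/2)); objective: alternative.

-- ===== PORT A =====
def bad_ids_twice (rango : List Int) : List Int :=
  rango.foldl (fun bad n =>
    let nStr : List Char := PySem.Int.toChars n
    let l : Int := PySem.List.len nStr
    if PySem.Int.mod l 2 ≠ 0 then bad
    else
      let j : Int := PySem.Int.floordiv l 2
      if PySem.List.pyRepeat (PySem.List.slice nStr none (some j)) 2 = nStr then bad ++ [n]
      else bad) []

-- ===== PORT B =====
-- B's digit-count loop `while m: m //= 10; d += 1`
def pyNumDigits (m : Nat) : Nat :=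
  if h : m = 0 then 0 else pyNumDigits (m / 10) + 1
termination_by m
decreasing_by exact Nat.div_lt_self (Nat.pos_of_ne_zero h) (by norm_num)

def bad_ids_twice_alt (rango : List Int) : List Int :=
  rango.foldl (fun bad n =>
    if n ≤ 0 then bad
    else
      let d : Nat := pyNumDigits n.toNat
      if d % 2 ≠ 0 then bad
      else
        let half : Int := (10 : Int) ^ (d / 2)
        if PySem.Int.floordiv n half = PySem.Int.mod n half then bad ++ [n] else bad) []

-- ===== PRECONDITION & SPEC =====
def Spec_bad_ids_twice (rango : List Int) (out : List Int) : Prop := out = bad_ids_twice_alt rango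
instance (rango : List Int) (out : List Int) : Decidable (Spec_bad_ids_twice rango out) := by unfold Spec_bad_ids_twice; infer_instance

-- ===== CLAIM (what is proved, stated in full; the proofs are below) =====
def Claim_equal_bad_ids_twice : Prop := ∀ (rango : List Int), Dom_bad_ids_twice rango → Spec_bad_ids_twice rango (bad_ids_twice rango)

-- ===== LEMMAS AND PROOFS =====

-- the per-element tests of the two ports, as booleans
def pA (n : Int) : Bool :=
  decide (PySem.Int.mod (PySem.List.len (PySem.Int.toChars n)) 2 = 0) &&
  decide (PySem.List.pyRepeat
      (PySem.List.slice (PySem.Int.toChars n) none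
        (some (PySem.Int.floordiv (PySem.List.len (PySem.Int.toChars n)) 2))) 2
    = PySem.Int.toChars n)

def pB (n : Int) : Bool :=
  decide (¬ n ≤ 0) && decide (pyNumDigits n.toNat % 2 = 0) &&
  decide (PySem.Int.floordiv n ((10 : Int) ^ (pyNumDigits n.toNat / 2))
        = PySem.Int.mod n ((10 : Int) ^ (pyNumDigits n.toNat / 2)))

lemma portA_filter (rango : List Int) : bad_ids_twice rango = rango.filter pA := by
  unfold bad_ids_twice
  have hstep : (fun (bad : List Int) (n : Int) =>
      let nStr : List Char := PySem.Int.toChars n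
      let l : Int := PySem.List.len nStr
      if PySem.Int.mod l 2 ≠ 0 then bad
      else
        let j : Int := PySem.Int.floordiv l 2
        if PySem.List.pyRepeat (PySem.List.slice nStr none (some j)) 2 = nStr then bad ++ [n]
        else bad)
      = fun bad n => if pA n = true then bad ++ [n] else bad := by
    funext bad n
    simp only [pA, Bool.and_eq_true, decide_eq_true_eq]
    split_ifs <;> first | rfl | tauto
  rw [hstep]
  simpa using PySem.List.foldl_append_if pA (fun x => x) rango []

lemma portB_filter (rango : List Int) : bad_ids_twice_alt rango = rango.filter pB := by
  unfold bad_ids_twice_alt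
  have hstep : (fun (bad : List Int) (n : Int) =>
      if n ≤ 0 then bad
      else
        let d : Nat := pyNumDigits n.toNat
        if d % 2 ≠ 0 then bad
        else
          let half : Int := (10 : Int) ^ (d / 2)
          if PySem.Int.floordiv n half = PySem.Int.mod n half then bad ++ [n] else bad)
      = fun bad n => if pB n = true then bad ++ [n] else bad := by
    funext bad n
    simp only [pB, Bool.and_eq_true, decide_eq_true_eq]
    split_ifs <;> first | rfl | tauto
  rw [hstep]
  simpa using PySem.List.foldl_append_if pB (fun x => x) rango []

-- decimal digit list, most significant first (what Nat.toDigits 10 computes)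
def Drep (m : Nat) : List Char :=
  if m < 10 then [Nat.digitChar m] else Drep (m / 10) ++ [Nat.digitChar (m % 10)]
termination_by m
decreasing_by exact Nat.div_lt_self (by omega) (by norm_num)

-- zero-padded k-digit representation of r (reads r mod 10^k)
def pad (k r : Nat) : List Char :=
  match k with
  | 0 => []
  | k + 1 => pad k (r / 10) ++ [Nat.digitChar (r % 10)]

lemma toDigitsCore_eq : ∀ f m acc, m < f → Nat.toDigitsCore 10 f m acc = Drep m ++ acc := by
  intro f
  induction f with
  | zero => intro m acc h; omega
  | succ f ih =>
    intro m acc h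
    by_cases h10 : m < 10
    · have hd : m / 10 = 0 := Nat.div_eq_of_lt h10
      rw [Drep]
      simp [Nat.toDigitsCore, hd, h10, Nat.mod_eq_of_lt h10]
    · have hpos : 0 < m := by omega
      have hlt : m / 10 < m := Nat.div_lt_self hpos (by norm_num)
      have hne : ¬ m / 10 = 0 := by
        have := Nat.div_le_div_right (c := 10) (show 10 ≤ m by omega)
        simp at this; omega
      rw [Drep]
      simp only [Nat.toDigitsCore, hne, if_neg h10, ite_false]
      rw [ih (m / 10) (Nat.digitChar (m % 10) :: acc) (by omega)]
      simp

lemma toDigits_eq (m : Nat) : Nat.toDigits 10 m = Drep m := by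
  have := toDigitsCore_eq (m + 1) m [] (by omega)
  simpa [Nat.toDigits] using this

lemma len_Drep : ∀ m, 1 ≤ m → (Drep m).length = pyNumDigits m := by
  intro m
  induction m using Nat.strong_induction_on with
  | _ m ih =>
    intro hm
    by_cases h10 : m < 10
    · have hd : m / 10 = 0 := Nat.div_eq_of_lt h10
      rw [Drep, pyNumDigits]
      simp [h10, hd, show ¬ m = 0 by omega, pyNumDigits]
    · have hpos : 0 < m := by omega
      have hlt : m / 10 < m := Nat.div_lt_self hpos (by norm_num)
      have h1 : 1 ≤ m / 10 := by
        have := Nat.div_le_div_right (c := 10) (show 10 ≤ m by omega)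
        simp at this; omega
      rw [Drep, pyNumDigits]
      simp [h10, show ¬ m = 0 by omega, ih (m / 10) hlt h1]

lemma nd_lt : ∀ m, m < 10 ^ pyNumDigits m := by
  intro m
  induction m using Nat.strong_induction_on with
  | _ m ih =>
    by_cases h0 : m = 0
    · subst h0; rw [pyNumDigits]; simp
    · have hpos : 0 < m := by omega
      have hlt : m / 10 < m := Nat.div_lt_self hpos (by norm_num)
      have := ih (m / 10) hlt
      rw [pyNumDigits]
      simp only [h0, dite_false]
      rw [pow_succ]
      have h2 : m / 10 + 1 ≤ 10 ^ pyNumDigits (m / 10) := this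
      have h3 : m < (m / 10 + 1) * 10 := by omega
      calc m < (m / 10 + 1) * 10 := h3
        _ ≤ 10 ^ pyNumDigits (m / 10) * 10 := by
            exact Nat.mul_le_mul_right 10 h2

lemma le_nd : ∀ m, 1 ≤ m → 10 ^ (pyNumDigits m - 1) ≤ m := by
  intro m
  induction m using Nat.strong_induction_on with
  | _ m ih =>
    intro hm
    by_cases h10 : m < 10
    · have hd : m / 10 = 0 := Nat.div_eq_of_lt h10
      rw [pyNumDigits]
      simp [show ¬ m = 0 by omega, hd, pyNumDigits]
      omega
    · have hpos : 0 < m := by omega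
      have hlt : m / 10 < m := Nat.div_lt_self hpos (by norm_num)
      have h1 : 1 ≤ m / 10 := by
        have := Nat.div_le_div_right (c := 10) (show 10 ≤ m by omega)
        simp at this; omega
      have ihm := ih (m / 10) hlt h1
      have hk : 1 ≤ pyNumDigits (m / 10) := by
        rw [pyNumDigits]; simp [show ¬ m / 10 = 0 by omega]
      rw [pyNumDigits]
      simp only [show ¬ m = 0 by omega, dite_false]
      have : 10 ^ (pyNumDigits (m / 10) + 1 - 1) = 10 ^ (pyNumDigits (m / 10) - 1) * 10 := by
        rw [← pow_succ]
        congr 1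
        omega
      rw [this]
      have h2 : 10 ^ (pyNumDigits (m / 10) - 1) * 10 ≤ (m / 10) * 10 :=
        Nat.mul_le_mul_right 10 ihm
      have h3 : (m / 10) * 10 ≤ m := by
        have := Nat.div_mul_le_self m 10
        omega
      omega

lemma nd_div_pow : ∀ k m, 10 ^ k ≤ m → pyNumDigits (m / 10 ^ k) = pyNumDigits m - k := by
  intro k
  induction k with
  | zero => intro m h; simp
  | succ k ih =>
    intro m h
    have h10 : (10 : Nat) ^ (k + 1) = 10 ^ k * 10 := pow_succ 10 k
    have hm10 : 10 ≤ m := by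
      have : 10 ≤ 10 ^ (k + 1) := by
        calc (10 : Nat) = 10 ^ 1 := (pow_one 10).symm
        _ ≤ 10 ^ (k + 1) := Nat.pow_le_pow_right (by norm_num) (by omega)
      omega
    have hdiv : 10 ^ k ≤ m / 10 := by
      rw [Nat.le_div_iff_mul_le (by norm_num)]
      omega
    have hdd : m / 10 ^ (k + 1) = m / 10 / 10 ^ k := by
      rw [Nat.div_div_eq_div_mul]
      congr 1
      rw [h10]; ring
    rw [hdd, ih (m / 10) hdiv]
    conv_rhs => rw [pyNumDigits]
    simp [show ¬ m = 0 by omega]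

lemma pad_len : ∀ k r, (pad k r).length = k := by
  intro k
  induction k with
  | zero => intro r; simp [pad]
  | succ k ih => intro r; simp [pad, ih]

lemma Drep_split : ∀ k m, 10 ^ k ≤ m → Drep m = Drep (m / 10 ^ k) ++ pad k (m % 10 ^ k) := by
  intro k
  induction k with
  | zero => intro m h; simp [pad]
  | succ k ih =>
    intro m h
    have h10 : (10 : Nat) ^ (k + 1) = 10 ^ k * 10 := pow_succ 10 k
    have hm10 : 10 ≤ m := by
      have : 10 ≤ 10 ^ (k + 1) := by
        calc (10 : Nat) = 10 ^ 1 := (pow_one 10).symm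
        _ ≤ 10 ^ (k + 1) := Nat.pow_le_pow_right (by norm_num) (by omega)
      omega
    have hdiv : 10 ^ k ≤ m / 10 := by
      rw [Nat.le_div_iff_mul_le (by norm_num)]
      omega
    have hdd : m / 10 ^ (k + 1) = m / 10 / 10 ^ k := by
      rw [Nat.div_div_eq_div_mul]
      congr 1
      rw [h10]; ring
    have e1 : m % 10 ^ (k + 1) / 10 = m / 10 % 10 ^ k := by
      rw [h10, Nat.mul_comm]
      exact Nat.mod_mul_right_div_self m 10 (10 ^ k)
    have e2 : m % 10 ^ (k + 1) % 10 = m % 10 :=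
      Nat.mod_mod_of_dvd m (by exact Dvd.intro (10 ^ k) (by rw [h10]; ring))
    rw [Drep]
    simp only [show ¬ m < 10 by omega, ite_false]
    rw [ih (m / 10) hdiv]
    show (Drep (m / 10 / 10 ^ k) ++ pad k (m / 10 % 10 ^ k)) ++ [Nat.digitChar (m % 10)]
        = Drep (m / 10 ^ (k + 1)) ++ pad (k + 1) (m % 10 ^ (k + 1))
    rw [hdd]
    simp only [pad, e1, e2, List.append_assoc]

lemma Drep_pad : ∀ k m, 1 ≤ m → pyNumDigits m = k → Drep m = pad k m := by
  intro k
  induction k with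
  | zero =>
    intro m hm hk
    rw [pyNumDigits] at hk
    simp [show ¬ m = 0 by omega] at hk
  | succ k ih =>
    intro m hm hk
    by_cases h10 : m < 10
    · have hd : m / 10 = 0 := Nat.div_eq_of_lt h10
      rw [pyNumDigits] at hk
      simp [show ¬ m = 0 by omega, hd, pyNumDigits] at hk
      subst hk
      rw [Drep]
      simp [h10, pad, Nat.mod_eq_of_lt h10]
    · have hpos : 0 < m := by omega
      have h1 : 1 ≤ m / 10 := by
        have := Nat.div_le_div_right (c := 10) (show 10 ≤ m by omega)
        simp at this; omega
      rw [pyNumDigits] at hk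
      simp [show ¬ m = 0 by omega] at hk
      rw [Drep]
      simp only [h10, ite_false]
      rw [ih (m / 10) h1 hk]
      rfl

lemma dch_inj : ∀ d < 10, ∀ e < 10, Nat.digitChar d = Nat.digitChar e → d = e := by decide

lemma dch_ne_dash : ∀ d < 10, Nat.digitChar d ≠ '-' := by decide

lemma pad_inj : ∀ k r r', r < 10 ^ k → r' < 10 ^ k → pad k r = pad k r' → r = r' := by
  intro k
  induction k with
  | zero => intro r r' h h' _; omega
  | succ k ih =>
    intro r r' h h' heq
    simp only [pad] at heq
    have hlen : (pad k (r / 10)).length = (pad k (r' / 10)).length := by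
      rw [pad_len, pad_len]
    obtain ⟨h1, h2⟩ := List.append_inj heq hlen
    have hc : Nat.digitChar (r % 10) = Nat.digitChar (r' % 10) := by
      simpa using h2
    have hm : r % 10 = r' % 10 :=
      dch_inj (r % 10) (Nat.mod_lt r (by norm_num)) (r' % 10) (Nat.mod_lt r' (by norm_num)) hc
    have hr : r / 10 < 10 ^ k := by
      rw [Nat.div_lt_iff_lt_mul (by norm_num)]
      have := pow_succ 10 k
      omega
    have hr' : r' / 10 < 10 ^ k := by
      rw [Nat.div_lt_iff_lt_mul (by norm_num)]
      have := pow_succ 10 k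
      omega
    have hd := ih (r / 10) (r' / 10) hr hr' h1
    omega

lemma mem_Drep : ∀ m, ∀ c ∈ Drep m, ∃ d, d < 10 ∧ c = Nat.digitChar d := by
  intro m
  induction m using Nat.strong_induction_on with
  | _ m ih =>
    intro c hc
    by_cases h10 : m < 10
    · rw [Drep] at hc
      simp [h10] at hc
      exact ⟨m, h10, hc⟩
    · have hpos : 0 < m := by omega
      have hlt : m / 10 < m := Nat.div_lt_self hpos (by norm_num)
      rw [Drep] at hc
      simp only [h10, ite_false, List.mem_append, List.mem_singleton] at hc
      rcases hc with hc | hc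
      · exact ih (m / 10) hlt c hc
      · exact ⟨m % 10, Nat.mod_lt m (by norm_num), hc⟩

lemma pyRepeat_two (u : List Char) : PySem.List.pyRepeat u 2 = u ++ u := by
  simp [PySem.List.pyRepeat]

-- the central arithmetic fact, on Nat
lemma main_pos (m : Nat) (hm : 1 ≤ m) (he : pyNumDigits m % 2 = 0) :
    ((Drep m).take (pyNumDigits m / 2) ++ (Drep m).take (pyNumDigits m / 2) = Drep m)
      ↔ m / 10 ^ (pyNumDigits m / 2) = m % 10 ^ (pyNumDigits m / 2) := by
  set k := pyNumDigits m with hkdef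
  set j := k / 2 with hjdef
  have hk1 : 1 ≤ k := by
    rw [hkdef, pyNumDigits]
    simp [show ¬ m = 0 by omega]
  have hk2j : k = 2 * j := by omega
  have hj1 : 1 ≤ j := by omega
  have h10j : 10 ^ j ≤ m := by
    calc 10 ^ j ≤ 10 ^ (k - 1) := Nat.pow_le_pow_right (by norm_num) (by omega)
    _ ≤ m := le_nd m hm
  have hq1 : 1 ≤ m / 10 ^ j := (Nat.one_le_div_iff (Nat.pow_pos (show 0 < 10 by norm_num))).2 h10j
  have hndq : pyNumDigits (m / 10 ^ j) = j := by
    rw [nd_div_pow j m h10j]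
    omega
  have hsplit := Drep_split j m h10j
  have hlq : (Drep (m / 10 ^ j)).length = j := by rw [len_Drep _ hq1, hndq]
  have htake : (Drep m).take j = Drep (m / 10 ^ j) := by
    rw [hsplit, List.take_left' hlq]
  have hr : m % 10 ^ j < 10 ^ j := Nat.mod_lt m (Nat.pow_pos (show 0 < 10 by norm_num))
  have hq : m / 10 ^ j < 10 ^ j := by
    have := nd_lt (m / 10 ^ j)
    rwa [hndq] at this
  constructor
  · intro h
    rw [htake, hsplit] at h
    have hpq : Drep (m / 10 ^ j) = pad j (m % 10 ^ j) := List.append_cancel_left h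
    have := (Drep_pad j (m / 10 ^ j) hq1 hndq).symm.trans hpq
    exact pad_inj j _ _ hq hr this
  · intro h
    rw [htake, hsplit]
    congr 1
    rw [Drep_pad j (m / 10 ^ j) hq1 hndq, h]

lemma pA_neg (n : Int) (hn : n < 0) : pA n = false := by
  have hchars : PySem.Int.toChars n = '-' :: Drep n.natAbs := by
    simp [PySem.Int.toChars, hn, toDigits_eq]
  set s : List Char := '-' :: Drep n.natAbs with hsdef
  set L : Nat := s.length with hLdef
  have hlen : PySem.List.len s = (L : Int) := by
    rw [PySem.List.len_eq]
  by_cases hpar : L % 2 = 0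
  · have hmod : PySem.Int.mod ((L : Int)) 2 = ((L % 2 : Nat) : Int) := by
      exact_mod_cast PySem.Int.mod_natCast L 2
    have hfd : PySem.Int.floordiv ((L : Int)) 2 = ((L / 2 : Nat) : Int) := by
      exact_mod_cast PySem.Int.floordiv_natCast L 2
    set j : Nat := L / 2 with hjdef
    have hL2j : L = 2 * j := by omega
    have hj1 : 1 ≤ j := by
      have : 1 ≤ L := by rw [hLdef]; simp [hsdef]
      omega
    have hDlen : (Drep n.natAbs).length = 2 * j - 1 := by
      have : L = (Drep n.natAbs).length + 1 := by simp [hLdef, hsdef]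
      omega
    suffices hne : ¬ (s.take j ++ s.take j = s) by
      simp only [pA, hchars, hlen, hmod, hfd, pyRepeat_two, PySem.List.slice_to_natCast]
      rw [decide_eq_false hne]
      simp
    intro heq
    have hjle : j ≤ L := by omega
    have hulen : (s.take j).length = j := by
      rw [List.length_take]
      omega
    have h1 : (s.take j ++ s.take j)[j]? = (s.take j)[0]? := by
      rw [List.getElem?_append_right (by omega)]
      congr 1
      omega
    have h2 : (s.take j)[0]? = some '-' := by
      rw [List.getElem?_take_of_lt (by omega)]
      simp [hsdef]
    have h3 : s[j]? = (Drep n.natAbs)[j - 1]? := by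
      rw [hsdef]
      rcases Nat.exists_eq_add_of_le hj1 with ⟨t, ht⟩
      rw [show j = t + 1 by omega]
      simp
    have h4 : ∃ c, (Drep n.natAbs)[j - 1]? = some c ∧ c ∈ Drep n.natAbs := by
      have hlt : j - 1 < (Drep n.natAbs).length := by omega
      exact ⟨_, List.getElem?_eq_getElem hlt, List.getElem_mem hlt⟩
    rcases h4 with ⟨c, hc, hcmem⟩
    rcases mem_Drep n.natAbs c hcmem with ⟨d, hd10, hdc⟩
    have : some '-' = some c := by
      rw [← h2, ← h1, heq, h3, hc]
    have : ('-' : Char) = c := by injection this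
    exact dch_ne_dash d hd10 (by rw [← hdc, ← this])
  · simp only [pA, hchars, hlen]
    have hmod : PySem.Int.mod ((L : Int)) 2 = ((L % 2 : Nat) : Int) := by
      exact_mod_cast PySem.Int.mod_natCast L 2
    rw [hmod, decide_eq_false (show ¬ ((L % 2 : Nat) : Int) = 0 by exact_mod_cast hpar)]
    simp

lemma pA_eq_pB (n : Int) : pA n = pB n := by
  rcases lt_trichotomy n 0 with hn | hn | hn
  · rw [pA_neg n hn]
    simp [pB, show n ≤ 0 by omega]
  · subst hn
    decide
  · have hm1 : 1 ≤ n.toNat := by omega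
    set m := n.toNat with hmdef
    have hchars : PySem.Int.toChars n = Drep m := by
      simp [PySem.Int.toChars, show ¬ n < 0 by omega, toDigits_eq, hmdef]
    have hlen : PySem.List.len (Drep m) = ((pyNumDigits m : Nat) : Int) := by
      simp [PySem.List.len_eq, len_Drep m hm1]
    have hmod : PySem.Int.mod ((pyNumDigits m : Nat) : Int) 2 = ((pyNumDigits m % 2 : Nat) : Int) := by
      exact_mod_cast PySem.Int.mod_natCast (pyNumDigits m) 2
    have hfd : PySem.Int.floordiv ((pyNumDigits m : Nat) : Int) 2 = ((pyNumDigits m / 2 : Nat) : Int) := by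
      exact_mod_cast PySem.Int.floordiv_natCast (pyNumDigits m) 2
    have hn' : n = (m : Int) := by omega
    have hpow : (10 : Int) ^ (pyNumDigits m / 2) = ((10 ^ (pyNumDigits m / 2) : Nat) : Int) := by
      push_cast; ring
    have hfd2 : PySem.Int.floordiv n ((10 : Int) ^ (pyNumDigits m / 2))
        = ((m / 10 ^ (pyNumDigits m / 2) : Nat) : Int) := by
      rw [hn', hpow]; exact PySem.Int.floordiv_natCast _ _
    have hmd2 : PySem.Int.mod n ((10 : Int) ^ (pyNumDigits m / 2))
        = ((m % 10 ^ (pyNumDigits m / 2) : Nat) : Int) := by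
      rw [hn', hpow]; exact PySem.Int.mod_natCast _ _
    simp only [pA, pB, hchars, hlen, hmod, hfd, hfd2, hmd2, pyRepeat_two,
      PySem.List.slice_to_natCast, ← hmdef]
    by_cases hpar : pyNumDigits m % 2 = 0
    · have ha : decide ((((pyNumDigits m % 2 : Nat)) : Int) = 0) = true := by
        rw [hpar]; simp
      have hb : decide (¬ n ≤ 0) = true := by simp; omega
      have hc : decide (pyNumDigits m % 2 = 0) = true := by simp [hpar]
      rw [ha, hb, hc]
      simp only [Bool.true_and]
      rw [decide_eq_decide, Int.natCast_inj]
      exact main_pos m hm1 hpar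
    · have ha : decide ((((pyNumDigits m % 2 : Nat)) : Int) = 0) = false :=
        decide_eq_false (by exact_mod_cast hpar)
      have hb : decide (pyNumDigits m % 2 = 0) = false := decide_eq_false hpar
      rw [ha, hb]
      simp

-- ===== VERDICT (by name: the statement is the Claim_ definition above) =====
theorem bad_ids_twice_spec : Claim_equal_bad_ids_twice := by
  intro rango _
  show bad_ids_twice rango = bad_ids_twice_alt rango
  rw [portA_filter, portB_filter]
  exact List.filter_congr (fun n _ => pA_eq_pB n)
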